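-- pv_equiv track=rewrite | github.com/xidchen/mednlp | mednlp/model/summary_extraction_model.py | get_input_sents
-- ===== SOURCE A (Python) =====
-- def get_input_sents(query_sents, query_length, sent_limit, char_limit):
--     output_query_sents = []
--     if query_length > char_limit:
--         current_query_length = 0
--         for sent in query_sents:
--             if current_query_length + len(sent) < char_limit:
--                 output_query_sents.append(sent)
--                 current_query_length += len(sent)
--             else:
--                 break
--         if len(output_query_sents) > sent_limit:
--             output_query_sents = output_query_sents[:sent_limit]
--     else:
--         output_query_sents = query_sents[:sent_limit]
--     return output_query_sents
-- ===== SOURCE B (Python) =====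
-- def get_input_sents(query_sents, query_length, sent_limit, char_limit):
--     if query_length <= char_limit:
--         return query_sents[:sent_limit]
--     # build the cumulative-length table once
--     totals = []
--     t = 0
--     for s in query_sents:
--         t += len(s)
--         totals.append(t)
--     # prefix length: sentences whose cumulative total stays strictly below char_limit
--     k = 0
--     while k < len(totals) and totals[k] < char_limit:
--         k += 1
--     return query_sents[:k][:sent_limit]
-- ===== Notes on version B (the rewrite author's own statement) =====
-- stated objective: alternative
-- what changed: Replaces the incremental append-and-break accumulation loop with a build-then-select decomposition: a cumulative-length table is built first, the kept prefix length is found by scanning it, and the result is obtained by slicing the input twice.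
import Mathlib
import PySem

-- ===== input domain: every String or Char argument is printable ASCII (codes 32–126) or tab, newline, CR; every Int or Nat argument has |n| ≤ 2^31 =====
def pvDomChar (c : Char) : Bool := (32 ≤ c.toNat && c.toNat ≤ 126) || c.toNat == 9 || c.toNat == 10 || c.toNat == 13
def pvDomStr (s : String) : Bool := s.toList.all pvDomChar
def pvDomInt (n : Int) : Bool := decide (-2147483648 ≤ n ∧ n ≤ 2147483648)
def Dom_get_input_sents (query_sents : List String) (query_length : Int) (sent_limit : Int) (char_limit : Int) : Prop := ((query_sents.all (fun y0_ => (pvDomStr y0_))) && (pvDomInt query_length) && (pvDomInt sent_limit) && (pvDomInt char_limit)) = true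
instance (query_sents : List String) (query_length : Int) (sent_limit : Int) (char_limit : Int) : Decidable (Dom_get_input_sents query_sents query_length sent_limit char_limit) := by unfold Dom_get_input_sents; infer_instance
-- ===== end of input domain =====

-- B replaces A's incremental append-and-break loop by a build-then-select decomposition
-- (cumulative-length table, then a prefix count, then two slices); same cost, alternative structure.

-- ===== PORT A =====
-- A's for-loop with break: accumulate sentences while the running length stays below char_limit
def getA_loop (sents : List String) (cur : Int) (acc : List String) (char_limit : Int) : List String :=
  match sents with
  | [] => acc
  | s :: rest =>
      if cur + PySem.Str.len s < char_limit then
        getA_loop rest (cur + PySem.Str.len s) (acc ++ [s]) char_limit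
      else acc

def get_input_sents (query_sents : List String) (query_length : Int) (sent_limit : Int) (char_limit : Int) : List String :=
  if query_length > char_limit then
    let out := getA_loop query_sents 0 [] char_limit
    if (out.length : Int) > sent_limit then PySem.List.slice out none (some sent_limit) else out
  else PySem.List.slice query_sents none (some sent_limit)

-- ===== PORT B =====
-- B's table-building for-loop: cumulative lengths of the sentences
def bTotals (sents : List String) (t : Int) : List Int :=
  match sents with
  | [] => []
  | s :: rest => (t + PySem.Str.len s) :: bTotals rest (t + PySem.Str.len s)

-- B's while-loop: how many leading totals are strictly below char_limit
def bCount (totals : List Int) (char_limit : Int) : Int :=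
  match totals with
  | [] => 0
  | t :: rest => if t < char_limit then 1 + bCount rest char_limit else 0

def get_input_sents_alt (query_sents : List String) (query_length : Int) (sent_limit : Int) (char_limit : Int) : List String :=
  if query_length ≤ char_limit then PySem.List.slice query_sents none (some sent_limit)
  else
    PySem.List.slice
      (PySem.List.slice query_sents none (some (bCount (bTotals query_sents 0) char_limit)))
      none (some sent_limit)

-- ===== PRECONDITION & SPEC =====
def Spec_get_input_sents (query_sents : List String) (query_length : Int) (sent_limit : Int) (char_limit : Int) (out : List String) : Prop := out = get_input_sents_alt query_sents query_length sent_limit char_limit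
instance (query_sents : List String) (query_length : Int) (sent_limit : Int) (char_limit : Int) (out : List String) : Decidable (Spec_get_input_sents query_sents query_length sent_limit char_limit out) := by unfold Spec_get_input_sents; infer_instance

-- ===== CLAIM (what is proved, stated in full; the proofs are below) =====
def Claim_equal_get_input_sents : Prop := ∀ (query_sents : List String) (query_length : Int) (sent_limit : Int) (char_limit : Int), Dom_get_input_sents query_sents query_length sent_limit char_limit → Spec_get_input_sents query_sents query_length sent_limit char_limit (get_input_sents query_sents query_length sent_limit char_limit)

-- ===== LEMMAS AND PROOFS =====

-- the prefix A's loop accumulates, written structurally (proof helper)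
def aPref (sents : List String) (cur : Int) (char_limit : Int) : List String :=
  match sents with
  | [] => []
  | s :: rest =>
      if cur + PySem.Str.len s < char_limit then s :: aPref rest (cur + PySem.Str.len s) char_limit
      else []

theorem getA_loop_eq (char_limit : Int) : ∀ (sents : List String) (cur : Int) (acc : List String),
    getA_loop sents cur acc char_limit = acc ++ aPref sents cur char_limit := by
  intro sents
  induction sents with
  | nil => intro cur acc; simp [getA_loop, aPref]
  | cons s rest ih =>
      intro cur acc
      simp only [getA_loop, aPref]
      split
      · rw [ih]; simp
      · simp

theorem bCount_nonneg (char_limit : Int) : ∀ (totals : List Int), 0 ≤ bCount totals char_limit := by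
  intro totals
  induction totals with
  | nil => simp [bCount]
  | cons t rest ih => simp only [bCount]; split <;> omega

theorem take_bCount_eq (char_limit : Int) : ∀ (sents : List String) (cur : Int),
    sents.take (bCount (bTotals sents cur) char_limit).toNat = aPref sents cur char_limit := by
  intro sents
  induction sents with
  | nil => intro cur; simp [bTotals, bCount, aPref]
  | cons s rest ih =>
      intro cur
      simp only [bTotals, bCount, aPref]
      split
      · have h := bCount_nonneg char_limit (bTotals rest (cur + PySem.Str.len s))
        have : (1 + bCount (bTotals rest (cur + PySem.Str.len s)) char_limit).toNat
            = (bCount (bTotals rest (cur + PySem.Str.len s)) char_limit).toNat + 1 := by omega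
        rw [this, List.take_succ_cons, ih]
      · simp

-- ===== VERDICT (by name: the statement is the Claim_ definition above) =====
theorem get_input_sents_spec : Claim_equal_get_input_sents := by
  intro qs ql sl cl _
  unfold Spec_get_input_sents get_input_sents get_input_sents_alt
  by_cases h : ql > cl
  · simp only [if_pos h, if_neg (by omega : ¬ ql ≤ cl)]
    rw [PySem.List.slice_to _ (bCount_nonneg cl (bTotals qs 0)),
        take_bCount_eq, getA_loop_eq]
    simp only [List.nil_append]
    split
    · rfl
    · rename_i hle
      have hsl : 0 ≤ sl := by
        have := Int.natCast_nonneg (aPref qs 0 cl).length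
        omega
      rw [PySem.List.slice_to _ hsl, List.take_of_length_le (by omega)]
  · simp only [if_neg h, if_pos (by omega : ql ≤ cl)]
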